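-- pv_equiv track=rewrite | github.com/greivinlopez/coding-solutions | python/leetcode/problems_0300_0399/338_counting_bits.py | count_bits_alt
-- ===== SOURCE A (Python) =====
-- def count_bits_alt(n):
--     res = [0] * (n + 1)
--     for i in range(1, n + 1):
--         if i % 2 == 1:
--             res[i] = res[i - 1] + 1
--         else:
--             res[i] = res[i // 2]
--     return res
-- ===== SOURCE B (Python) =====
-- def count_bits_alt(n):
--     def popcount(v):
--         c = 0
--         while v:
--             c += v & 1
--             v >>= 1
--         return c
--     return [popcount(i) for i in range(n + 1)]
-- ===== Notes on version B (the rewrite author's own statement) =====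
-- stated objective: alternative
-- what changed: Drops the DP table entirely: each entry is computed independently by a direct bit-loop popcount over a range comprehension, instead of A's in-place table filled by a parity-dependent recurrence on earlier entries.
import Mathlib
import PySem

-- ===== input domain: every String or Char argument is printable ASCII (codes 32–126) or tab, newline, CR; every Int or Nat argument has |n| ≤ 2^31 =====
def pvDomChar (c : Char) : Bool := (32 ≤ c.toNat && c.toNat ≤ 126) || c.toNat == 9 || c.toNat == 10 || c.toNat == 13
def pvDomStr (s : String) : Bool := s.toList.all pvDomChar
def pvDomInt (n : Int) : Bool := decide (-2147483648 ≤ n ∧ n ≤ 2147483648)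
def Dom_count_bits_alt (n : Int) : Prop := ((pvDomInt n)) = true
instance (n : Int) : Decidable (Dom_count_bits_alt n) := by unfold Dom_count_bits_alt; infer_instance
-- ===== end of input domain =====

-- B drops A's DP table: each entry is an independent bit-loop popcount over a
-- range comprehension instead of a table filled by a parity recurrence; objective: alternative.

-- ===== PORT A =====
def countBitsStepA (res : List Int) (i : Int) : List Int :=
  if PySem.Int.mod i 2 = 1 then
    PySem.List.pySetD res i (PySem.List.pyGetD res (i - 1) 0 + 1)
  else
    PySem.List.pySetD res i (PySem.List.pyGetD res (PySem.Int.floordiv i 2) 0)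

def count_bits_alt (n : Int) : List Int :=
  (PySem.List.pyRange 1 (n + 1) 1).foldl countBitsStepA
    (PySem.List.pyRepeat [(0 : Int)] (n + 1))

-- ===== PORT B =====
-- inner 'while v:' loop of popcount, with accumulator c (v & 1, v >>= 1)
def popcLoop (c : Nat) (v : Nat) : Nat :=
  if h : v = 0 then c else popcLoop (c + (v &&& 1)) (v >>> 1)
decreasing_by simpa [Nat.shiftRight_one] using Nat.div_lt_self (Nat.pos_of_ne_zero h) one_lt_two

-- i ranges over range(0, n+1), so i ≥ 0 and i.toNat is exact
def count_bits_alt_alt (n : Int) : List Int :=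
  (PySem.List.pyRange 0 (n + 1) 1).map (fun i => (popcLoop 0 i.toNat : Int))

-- ===== PRECONDITION & SPEC =====
def Spec_count_bits_alt (n : Int) (out : List Int) : Prop := out = count_bits_alt_alt n
instance (n : Int) (out : List Int) : Decidable (Spec_count_bits_alt n out) := by unfold Spec_count_bits_alt; infer_instance

-- ===== CLAIM (what is proved, stated in full; the proofs are below) =====
def Claim_equal_count_bits_alt : Prop := ∀ (n : Int), Dom_count_bits_alt n → Spec_count_bits_alt n (count_bits_alt n)

-- ===== LEMMAS AND PROOFS =====

/-- Number of set bits, by halving: the reference value both programs compute. -/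
def popBits (n : Nat) : Nat :=
  if h : n = 0 then 0 else popBits (n / 2) + n % 2
decreasing_by exact Nat.div_lt_self (Nat.pos_of_ne_zero h) one_lt_two

theorem popBits_zero : popBits 0 = 0 := by simp [popBits]

theorem popBits_unfold (n : Nat) : popBits n = popBits (n / 2) + n % 2 := by
  by_cases h : n = 0
  · subst h; simp [popBits]
  · rw [popBits]; simp [h]

theorem popBits_odd {n : Nat} (h : n % 2 = 1) : popBits n = popBits (n - 1) + 1 := by
  have h1 : (n - 1) / 2 = n / 2 := by omega
  have h2 : (n - 1) % 2 = 0 := by omega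
  rw [popBits_unfold n, popBits_unfold (n - 1), h1, h2, h]

/-- B's accumulator loop computes popBits. -/
theorem popcLoop_eq (v : Nat) : ∀ c, popcLoop c v = c + popBits v := by
  induction v using Nat.strong_induction_on with
  | _ v ih =>
    intro c
    by_cases h : v = 0
    · subst h; simp [popcLoop, popBits_zero]
    · rw [popcLoop]
      simp only [h, dite_false]
      rw [ih (v >>> 1) (by simpa [Nat.shiftRight_one] using Nat.div_lt_self (Nat.pos_of_ne_zero h) one_lt_two)]
      rw [Nat.shiftRight_one, Nat.and_one_is_mod, popBits_unfold v]
      omega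

/-- The table A's loop maintains: entries up to k filled with popBits, zeros beyond. -/
def bitsTbl (len k : Nat) : List Int :=
  (List.range len).map (fun j => if j ≤ k then (popBits j : Int) else 0)

theorem bitsTbl_zero (len : Nat) : bitsTbl len 0 = List.replicate len 0 := by
  apply List.ext_getElem
  · simp [bitsTbl]
  · intro j h1 h2
    simp only [bitsTbl, List.getElem_map, List.getElem_range, List.getElem_replicate]
    split_ifs with h
    · have : j = 0 := by omega
      subst this; simp [popBits_zero]
    · rfl

theorem bitsTbl_getD (len k j : Nat) (hj : j < len) (hjk : j ≤ k) :
    (bitsTbl len k).getD j 0 = (popBits j : Int) := by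
  rw [List.getD_eq_getElem _ _ (by simp [bitsTbl]; omega)]
  simp [bitsTbl, hjk]

theorem bitsTbl_set (len i : Nat) (h1 : 1 ≤ i) (h2 : i < len) :
    (bitsTbl len (i - 1)).set i ((popBits i : Int)) = bitsTbl len i := by
  apply List.ext_getElem
  · simp [bitsTbl]
  · intro j hj hj'
    simp only [bitsTbl, List.length_map, List.length_range] at hj hj'
    simp only [bitsTbl, List.getElem_set, List.getElem_map, List.getElem_range]
    by_cases h : i = j
    · subst h
      rw [if_pos rfl, if_pos (le_refl i)]
    · rw [if_neg h]
      split_ifs with ha hb hb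
      · rfl
      · omega
      · omega
      · rfl

theorem stepA_tbl (len i : Nat) (h1 : 1 ≤ i) (h2 : i < len) :
    countBitsStepA (bitsTbl len (i - 1)) (i : Int) = bitsTbl len i := by
  unfold countBitsStepA
  have hmod : PySem.Int.mod (i : Int) 2 = ((i % 2 : Nat) : Int) := by
    exact_mod_cast PySem.Int.mod_natCast i 2
  rcases Nat.mod_two_eq_zero_or_one i with hp | hp
  · rw [hmod, hp]
    rw [if_neg (by norm_num)]
    rw [show PySem.Int.floordiv (i : Int) 2 = ((i / 2 : Nat) : Int) from by
      exact_mod_cast PySem.Int.floordiv_natCast i 2]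
    rw [PySem.List.pyGetD_natCast, PySem.List.pySetD_natCast]
    rw [bitsTbl_getD len (i - 1) (i / 2) (by omega) (by omega)]
    have hv : (popBits (i / 2) : Int) = (popBits i : Int) := by
      rw [popBits_unfold i, hp, Nat.add_zero]
    rw [hv]
    exact bitsTbl_set len i h1 h2
  · rw [hmod, hp]
    rw [if_pos (by norm_num)]
    rw [show (i : Int) - 1 = ((i - 1 : Nat) : Int) from by omega]
    rw [PySem.List.pyGetD_natCast, PySem.List.pySetD_natCast]
    rw [bitsTbl_getD len (i - 1) (i - 1) (by omega) (le_refl _)]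
    have hv : ((popBits (i - 1) : Int) + 1) = (popBits i : Int) := by
      rw [popBits_odd hp]; push_cast; ring
    rw [hv]
    exact bitsTbl_set len i h1 h2

theorem foldA_tbl (len : Nat) (k : Nat) (hk : k < len) :
    (PySem.List.pyRange 1 ((k : Int) + 1) 1).foldl countBitsStepA (bitsTbl len 0) = bitsTbl len k := by
  induction k with
  | zero => rw [PySem.List.pyRange_one_eq_nil (by omega)]; rfl
  | succ k ih =>
    rw [show (((k + 1 : Nat) : Int) + 1) = (((k : Int) + 1) + 1) from by push_cast; ring]
    rw [PySem.List.pyRange_one_succ_right (by omega), List.foldl_append, ih (by omega)]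
    have hs := stepA_tbl len (k + 1) (by omega) hk
    simp only [List.foldl_cons, List.foldl_nil]
    rw [show ((k : Int) + 1) = (((k + 1 : Nat) : Int)) from by push_cast; ring]
    rw [show (k + 1 - 1) = k from by omega] at hs
    exact hs

/-- The full table is exactly the per-index popBits map. -/
theorem bitsTbl_full (k : Nat) :
    bitsTbl (k + 1) k = (List.range (k + 1)).map (fun j => (popBits j : Int)) := by
  apply List.ext_getElem
  · simp [bitsTbl]
  · intro j hj hj'
    simp only [bitsTbl, List.length_map, List.length_range] at hj
    simp only [bitsTbl, List.getElem_map, List.getElem_range]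
    rw [if_pos (by omega)]

/-- B's comprehension is the same per-index popBits map. -/
theorem altB_map (k : Nat) :
    count_bits_alt_alt (k : Int) = (List.range (k + 1)).map (fun j => (popBits j : Int)) := by
  unfold count_bits_alt_alt
  rw [PySem.List.pyRange_one]
  rw [show (((k : Int) + 1) - 0).toNat = k + 1 from by omega]
  rw [List.map_map]
  apply List.map_congr_left
  intro t ht
  simp only [Function.comp]
  rw [show ((0 : Int) + (t : Int)).toNat = t from by omega]
  rw [popcLoop_eq t 0, Nat.zero_add]

-- ===== VERDICT (by name: the statement is the Claim_ definition above) =====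
theorem count_bits_alt_spec : Claim_equal_count_bits_alt := by
  intro n _
  unfold Spec_count_bits_alt
  by_cases h : n < 0
  · unfold count_bits_alt count_bits_alt_alt
    rw [PySem.List.pyRange_one_eq_nil (by omega), PySem.List.pyRange_one_eq_nil (by omega)]
    simp [PySem.List.pyRepeat_singleton, show (n + 1).toNat = 0 from by omega]
  · obtain ⟨k, hk⟩ : ∃ k : Nat, n = (k : Int) := ⟨n.toNat, by omega⟩
    subst hk
    rw [altB_map k]
    unfold count_bits_alt
    have hrep : PySem.List.pyRepeat [(0 : Int)] ((k : Int) + 1) = bitsTbl (k + 1) 0 := by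
      rw [PySem.List.pyRepeat_singleton, bitsTbl_zero,
        show ((k : Int) + 1).toNat = k + 1 from by omega]
    rw [hrep, foldA_tbl (k + 1) k (by omega), bitsTbl_full]
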